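-- pv_equiv track=rewrite | github.com/jangseungwon08/coding-test | 프로그래머스/0/181854. 배열의 길이에 따라 다른 연산하기/배열의 길이에 따라 다른 연산하기.py | solution
-- ===== SOURCE A (Python) =====
-- def solution(arr, n):
--     answer = []
--
--     for i in range(len(arr)):
--         #arr길이 홀수면
--         if len(arr) % 2:
--             #짝수 인덱스의 위치이면
--             if i % 2 == 0:
--                 #n값 더해준 것을 append시켜준다.
--                 answer.append(arr[i]+n)
--             else:
--                 answer.append(arr[i])
--         #arr길이 짝수면
--         else:
--             #홀수 인덱스의 위치이면
--             if i % 2: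
--                 answer.append(arr[i]+n)
--             else:
--                 answer.append(arr[i])
--     return answer
-- ===== SOURCE B (Python) =====
-- def solution(arr, n):
--     answer = list(arr)
--     start = 0 if len(arr) % 2 else 1
--     for i in range(start, len(arr), 2):
--         answer[i] += n
--     return answer
-- ===== Notes on version B (the rewrite author's own statement) =====
-- stated objective: simpler
-- what changed: B copies the array once and does a single strided loop over only the targeted indices (start = parity offset, step 2), mutating in place, instead of A's per-element loop with nested length/index parity branches and appends.
import Mathlib
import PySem

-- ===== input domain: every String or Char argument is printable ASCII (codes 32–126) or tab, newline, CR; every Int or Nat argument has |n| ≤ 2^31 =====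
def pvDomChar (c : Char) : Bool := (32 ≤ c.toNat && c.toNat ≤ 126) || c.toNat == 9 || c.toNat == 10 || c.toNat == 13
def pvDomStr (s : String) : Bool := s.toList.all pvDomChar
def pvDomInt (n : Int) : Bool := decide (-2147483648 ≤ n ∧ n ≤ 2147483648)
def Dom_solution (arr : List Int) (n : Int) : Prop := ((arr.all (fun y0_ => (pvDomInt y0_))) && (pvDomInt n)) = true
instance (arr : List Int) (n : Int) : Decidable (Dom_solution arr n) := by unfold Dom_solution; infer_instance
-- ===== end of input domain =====

-- B replaces A's per-element nested parity branches by one strided in-place loop over only the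
-- indices that change (objective: simpler). B does not mutate its argument (it copies first), like A.

-- ===== PORT A =====
-- literal transliteration of A: for i in range(len(arr)) with nested parity branches, appending.
-- arr[i] is ported as pyGetD (index always in range: 0 ≤ i < len(arr)).
def solution (arr : List Int) (n : Int) : List Int :=
  (PySem.List.pyRange 0 (arr.length : Int) 1).foldl
    (fun answer i =>
      if PySem.Int.mod (arr.length : Int) 2 ≠ 0 then
        if PySem.Int.mod i 2 = 0 then answer ++ [PySem.List.pyGetD arr i 0 + n]
        else answer ++ [PySem.List.pyGetD arr i 0]
      else
        if PySem.Int.mod i 2 ≠ 0 then answer ++ [PySem.List.pyGetD arr i 0 + n]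
        else answer ++ [PySem.List.pyGetD arr i 0])
    []

-- ===== PORT B =====
-- literal transliteration of Source B: answer = list(arr); stride-2 loop answer[i] += n.
-- answer[i] read as pyGetD, write as List.set (index always in range: start ≤ i < len(arr)).
def solution_alt (arr : List Int) (n : Int) : List Int :=
  let start : Int := if PySem.Int.mod (arr.length : Int) 2 ≠ 0 then 0 else 1
  (PySem.List.pyRange start (arr.length : Int) 2).foldl
    (fun answer i => answer.set i.toNat (PySem.List.pyGetD answer i 0 + n)) arr

-- ===== PRECONDITION & SPEC =====
def Spec_solution (arr : List Int) (n : Int) (out : List Int) : Prop := out = solution_alt arr n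
instance (arr : List Int) (n : Int) (out : List Int) : Decidable (Spec_solution arr n out) := by unfold Spec_solution; infer_instance

-- ===== CLAIM (what is proved, stated in full; the proofs are below) =====
def Claim_equal_solution : Prop := ∀ (arr : List Int) (n : Int), Dom_solution arr n → Spec_solution arr n (solution arr n)

-- ===== LEMMAS AND PROOFS =====

-- length is preserved by B's fold of in-place updates
lemma length_foldl_set (n : Int) (idxs : List Int) (l : List Int) :
    (idxs.foldl (fun answer i => answer.set i.toNat (PySem.List.pyGetD answer i 0 + n)) l).length
      = l.length := by
  induction idxs generalizing l with
  | nil => rfl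
  | cons i rest ih => simp [List.foldl_cons, ih, List.length_set]

-- pointwise characterisation of B's fold: index j gets +n iff (j : Int) is among the updated indices
lemma getD_foldl_set (n : Int) (idxs : List Int) (l : List Int)
    (hnd : idxs.Nodup) (hb : ∀ i ∈ idxs, 0 ≤ i ∧ i < (l.length : Int)) (j : Nat) :
    (idxs.foldl (fun answer i => answer.set i.toNat (PySem.List.pyGetD answer i 0 + n)) l).getD j 0
      = if ((j : Int) ∈ idxs) then l.getD j 0 + n else l.getD j 0 := by
  induction idxs generalizing l with
  | nil => simp
  | cons i rest ih =>
    obtain ⟨hni, hndr⟩ := List.nodup_cons.mp hnd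
    have hb0 := hb i (List.mem_cons_self ..)
    have hilen : i.toNat < l.length := by omega
    have hrest : ∀ x ∈ rest, 0 ≤ x ∧ x < ((l.set i.toNat (PySem.List.pyGetD l i 0 + n)).length : Int) := by
      intro x hx; simpa [List.length_set] using hb x (List.mem_cons_of_mem _ hx)
    rw [List.foldl_cons, ih _ hndr hrest]
    by_cases hji : (j : Int) = i
    · have hjt : i.toNat = j := by omega
      have hjr : (j : Int) ∉ rest := by rw [hji]; exact hni
      have hget : PySem.List.pyGetD l i 0 = l.getD j 0 := by
        rw [← hji, PySem.List.pyGetD_natCast]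
      rw [if_neg hjr, if_pos (by simp [List.mem_cons, hji])]
      have hset : (l.set i.toNat (PySem.List.pyGetD l i 0 + n)).getD j 0
          = PySem.List.pyGetD l i 0 + n := by
        rw [List.getD_eq_getElem _ _ (by rw [List.length_set]; omega)]
        subst hjt; simp
      rw [hset, hget]
    · have hjt : i.toNat ≠ j := by omega
      have hset : (l.set i.toNat (PySem.List.pyGetD l i 0 + n)).getD j 0 = l.getD j 0 := by
        simp [List.getD, List.getElem?_set_ne hjt]
      rw [hset]
      simp only [List.mem_cons, hji, false_or]

-- B's stride-2 index list has no duplicates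
lemma nodup_pyRange_two (a b : Int) : (PySem.List.pyRange a b 2).Nodup := by
  rw [PySem.List.pyRange_of_pos a b (by norm_num)]
  exact (List.nodup_range).map (fun x y h => by omega)

-- A as a map over indices
lemma solution_eq_map (arr : List Int) (n : Int) :
    solution arr n = (List.range arr.length).map (fun (k : Nat) =>
      if PySem.Int.mod (arr.length : Int) 2 ≠ 0 then
        if PySem.Int.mod ((0 : Int) + (k : Int)) 2 = 0 then PySem.List.pyGetD arr ((0 : Int) + (k : Int)) 0 + n
        else PySem.List.pyGetD arr ((0 : Int) + (k : Int)) 0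
      else
        if PySem.Int.mod ((0 : Int) + (k : Int)) 2 ≠ 0 then PySem.List.pyGetD arr ((0 : Int) + (k : Int)) 0 + n
        else PySem.List.pyGetD arr ((0 : Int) + (k : Int)) 0) := by
  unfold solution
  have hbody : (fun (answer : List Int) (i : Int) =>
      if PySem.Int.mod (arr.length : Int) 2 ≠ 0 then
        if PySem.Int.mod i 2 = 0 then answer ++ [PySem.List.pyGetD arr i 0 + n]
        else answer ++ [PySem.List.pyGetD arr i 0]
      else
        if PySem.Int.mod i 2 ≠ 0 then answer ++ [PySem.List.pyGetD arr i 0 + n]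
        else answer ++ [PySem.List.pyGetD arr i 0])
      = fun answer i => answer ++ [if PySem.Int.mod (arr.length : Int) 2 ≠ 0 then
          if PySem.Int.mod i 2 = 0 then PySem.List.pyGetD arr i 0 + n
          else PySem.List.pyGetD arr i 0
        else
          if PySem.Int.mod i 2 ≠ 0 then PySem.List.pyGetD arr i 0 + n
          else PySem.List.pyGetD arr i 0] := by
    funext answer i; split_ifs <;> rfl
  rw [hbody, PySem.List.foldl_append_singleton_eq_map, PySem.List.pyRange_one, List.map_map]
  simp only [List.nil_append, Int.sub_zero, Int.toNat_natCast]
  rfl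

-- ===== VERDICT (by name: the statement is the Claim_ definition above) =====
theorem solution_spec : Claim_equal_solution := by
  intro arr n _
  unfold Spec_solution
  show solution arr n = solution_alt arr n
  simp only [solution_alt]
  set start : Int := if PySem.Int.mod (arr.length : Int) 2 ≠ 0 then 0 else 1 with hstart
  have hmodL : PySem.Int.mod (arr.length : Int) 2 = (arr.length : Int) % 2 :=
    PySem.Int.mod_eq_emod_of_pos (by norm_num)
  have hstart' : start = if (arr.length : Int) % 2 ≠ 0 then 0 else 1 := by rw [hstart, hmodL]
  have hs01 : start = 0 ∨ start = 1 := by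
    by_cases h : (arr.length : Int) % 2 ≠ 0
    · left; rw [hstart', if_pos h]
    · right; rw [hstart', if_neg h]
  have hb : ∀ i ∈ PySem.List.pyRange start (arr.length : Int) 2, 0 ≤ i ∧ i < (arr.length : Int) := by
    intro i hi
    rw [PySem.List.mem_pyRange_iff_of_pos (by norm_num)] at hi
    rcases hs01 with h | h <;> omega
  apply List.ext_getElem
  · rw [solution_eq_map, length_foldl_set]; simp
  · intro j hja hjb
    have hjL : j < arr.length := by simpa [length_foldl_set] using hjb
    have hjL' : (j : Int) < (arr.length : Int) := by exact_mod_cast hjL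
    have hA : (solution arr n).getD j 0 = (solution arr n)[j] := List.getD_eq_getElem _ _ hja
    have hB := List.getD_eq_getElem
      ((PySem.List.pyRange start (arr.length : Int) 2).foldl
        (fun answer i => answer.set i.toNat (PySem.List.pyGetD answer i 0 + n)) arr) 0 hjb
    rw [← hA, ← hB, getD_foldl_set n _ arr (nodup_pyRange_two _ _) hb j, solution_eq_map]
    have hm : ((j : Int)) ∈ PySem.List.pyRange start (arr.length : Int) 2 ↔
        start ≤ (j : Int) ∧ (j : Int) < (arr.length : Int) ∧ (2 : Int) ∣ (j : Int) - start :=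
      PySem.List.mem_pyRange_iff_of_pos (by norm_num) _
    have hmod2 : PySem.Int.mod ((0 : Int) + (j : Int)) 2 = ((0 : Int) + (j : Int)) % 2 :=
      PySem.Int.mod_eq_emod_of_pos (by norm_num)
    have hg : PySem.List.pyGetD arr ((0 : Int) + (j : Int)) 0 = arr.getD j 0 := by
      rw [zero_add, PySem.List.pyGetD_natCast]
    rw [List.getD_eq_getElem _ _ (by simpa using hjL)]
    simp only [List.getElem_map, List.getElem_range, hg, hmod2, hmodL]
    have key : (((j : Int)) ∈ PySem.List.pyRange start (arr.length : Int) 2) ↔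
        (if (arr.length : Int) % 2 ≠ 0 then ((0 : Int) + (j : Int)) % 2 = 0
         else ¬ ((0 : Int) + (j : Int)) % 2 = 0) := by
      rw [hm, hstart']
      by_cases hLp : (arr.length : Int) % 2 ≠ 0
      · rw [if_pos hLp, if_pos hLp]
        constructor <;> intro h <;> omega
      · rw [if_neg hLp, if_neg hLp]
        constructor <;> intro h <;> omega
    by_cases hLp : ((arr.length : Int)) % 2 ≠ 0
    · rw [if_pos hLp]
      by_cases hj2 : ((0 : Int) + (j : Int)) % 2 = 0
      · rw [if_pos hj2, if_pos (key.mpr (by rw [if_pos hLp]; exact hj2))]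
      · rw [if_neg hj2, if_neg (fun hmem => hj2 (by have := key.mp hmem; rwa [if_pos hLp] at this))]
    · rw [if_neg hLp]
      by_cases hj2 : ((0 : Int) + (j : Int)) % 2 = 0
      · rw [if_neg (by simpa using hj2),
            if_neg (fun hmem => (by have := key.mp hmem; rw [if_neg hLp] at this; exact this hj2))]
      · rw [if_pos (by simpa using hj2), if_pos (key.mpr (by rw [if_neg hLp]; exact hj2))]
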